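-- pv_equiv track=rewrite | github.com/xironix/libgfd | helpers/download_utils.py | get_chunk_size
-- ===== SOURCE A (Python) =====
-- KB = 1024
--
-- MB = 1024 * KB
--
-- def get_chunk_size(file_size):
--     """
--     Determines the optimal chunk size based on the file size.
--
--     Args:
--         file_size (int): The size of the file in bytes.
--
--     Returns:
--         int: The optimal chunk size in bytes.
--     """
--     thresholds = [
--         (1 * MB, 8 * KB),      # Less than 1 MB
--         (10 * MB, 16 * KB),    # 1 MB to 10 MB
--         (50 * MB, 64 * KB),    # 10 MB to 50 MB
--         (100 * MB, 128 * KB),  # 50 MB to 100 MB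
--         (250 * MB, 256 * KB),  # 100 MB to 250 MB
--     ]
--
--     for threshold, chunk_size in thresholds:
--         if file_size < threshold:
--             return chunk_size
--
--     return 1 * MB
-- ===== SOURCE B (Python) =====
-- KB = 1024
--
-- MB = 1024 * KB
--
-- def get_chunk_size(file_size):
--     """Binary search into a lookup table instead of a linear threshold scan."""
--     bounds = [1 * MB, 10 * MB, 50 * MB, 100 * MB, 250 * MB]
--     chunks = [8 * KB, 16 * KB, 64 * KB, 128 * KB, 256 * KB, 1 * MB]
--     lo, hi = 0, len(bounds)
--     while lo < hi:  # hand-rolled bisect_right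
--         mid = (lo + hi) // 2
--         if file_size < bounds[mid]:
--             hi = mid
--         else:
--             lo = mid + 1
--     return chunks[lo]
-- ===== Notes on version B (the rewrite author's own statement) =====
-- stated objective: idiomatic
-- what changed: Replaces the linear scan over (threshold, chunk) pairs with a binary search (hand-rolled bisect_right) over a boundaries list indexing a parallel chunks table.
import Mathlib
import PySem

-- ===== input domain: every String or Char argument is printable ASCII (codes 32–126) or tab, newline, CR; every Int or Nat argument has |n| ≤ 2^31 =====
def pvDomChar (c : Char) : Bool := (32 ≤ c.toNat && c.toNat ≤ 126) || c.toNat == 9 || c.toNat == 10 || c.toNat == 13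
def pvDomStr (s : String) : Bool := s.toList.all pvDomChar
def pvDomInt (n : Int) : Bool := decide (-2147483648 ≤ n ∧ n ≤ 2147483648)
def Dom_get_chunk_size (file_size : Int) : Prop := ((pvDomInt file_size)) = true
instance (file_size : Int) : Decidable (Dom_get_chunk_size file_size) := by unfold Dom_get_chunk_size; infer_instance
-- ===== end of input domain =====

-- B replaces A's linear threshold scan with a binary search into a lookup table (idiomatic bisect_right).

-- ===== PORT A =====
-- A's loop over the threshold list, returning at the first strict '<' hit.
def chunkScan (file_size : Int) : List (Int × Int) → Int
  | [] => 1 * (1024 * 1024)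
  | (threshold, chunk_size) :: rest =>
      if file_size < threshold then chunk_size else chunkScan file_size rest

def get_chunk_size (file_size : Int) : Int :=
  chunkScan file_size
    [(1 * (1024 * 1024), 8 * 1024), (10 * (1024 * 1024), 16 * 1024),
     (50 * (1024 * 1024), 64 * 1024), (100 * (1024 * 1024), 128 * 1024),
     (250 * (1024 * 1024), 256 * 1024)]

-- ===== PORT B =====
-- hand-rolled bisect_right loop of Source B (lo, hi shrink until equal)
def bsLoop (bounds : List Int) (x : Int) (lo hi : Nat) : Nat :=
  if lo < hi then
    let mid := (lo + hi) / 2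
    if x < bounds.getD mid 0 then bsLoop bounds x lo mid else bsLoop bounds x (mid + 1) hi
  else lo
termination_by hi - lo
decreasing_by all_goals omega

def get_chunk_size_alt (file_size : Int) : Int :=
  let bounds : List Int := [1 * (1024 * 1024), 10 * (1024 * 1024), 50 * (1024 * 1024),
                            100 * (1024 * 1024), 250 * (1024 * 1024)]
  let chunks : List Int := [8 * 1024, 16 * 1024, 64 * 1024, 128 * 1024, 256 * 1024, 1 * (1024 * 1024)]
  chunks.getD (bsLoop bounds file_size 0 bounds.length) 0

-- ===== PRECONDITION & SPEC =====
def Spec_get_chunk_size (file_size : Int) (out : Int) : Prop := out = get_chunk_size_alt file_size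
instance (file_size : Int) (out : Int) : Decidable (Spec_get_chunk_size file_size out) := by unfold Spec_get_chunk_size; infer_instance

-- ===== CLAIM (what is proved, stated in full; the proofs are below) =====
def Claim_equal_get_chunk_size : Prop := ∀ (file_size : Int), Dom_get_chunk_size file_size → Spec_get_chunk_size file_size (get_chunk_size file_size)

-- ===== LEMMAS AND PROOFS =====
theorem bsLoop_eval (bounds : List Int) (x : Int) (lo hi : Nat) :
    bsLoop bounds x lo hi =
      if lo < hi then
        (if x < bounds.getD ((lo + hi) / 2) 0 then bsLoop bounds x lo ((lo + hi) / 2)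
         else bsLoop bounds x ((lo + hi) / 2 + 1) hi)
      else lo := by
  rw [bsLoop]

-- ===== VERDICT (by name: the statement is the Claim_ definition above) =====
theorem get_chunk_size_spec : Claim_equal_get_chunk_size := by
  intro fs _
  unfold Spec_get_chunk_size get_chunk_size get_chunk_size_alt chunkScan
  by_cases h1 : fs < 1 * (1024 * 1024) <;>
  by_cases h2 : fs < 10 * (1024 * 1024) <;>
  by_cases h3 : fs < 50 * (1024 * 1024) <;>
  by_cases h4 : fs < 100 * (1024 * 1024) <;>
  by_cases h5 : fs < 250 * (1024 * 1024) <;>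
  first
    | omega
    | (simp only [List.length_cons, List.length_nil]
       norm_num at h1 h2 h3 h4 h5
       repeat (rw [bsLoop_eval]; norm_num [chunkScan, List.getD, h1, h2, h3, h4, h5])
       try (split_ifs <;> first | omega | norm_num [List.getD]))
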